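-- pv_equiv track=rewrite | github.com/pfjob09/MarketingAnalytics | multichannel_advertising_attribution.py | create_path_with_value
-- ===== SOURCE A (Python) =====
-- def create_path_with_value(element):
--     path=[]
--     path.append('start')
--
--     visits = element[1]
--     visits = sorted(visits,key=lambda x:x[3])
--
--     channels = [x[1] for x in visits]
--     for channel in channels:
--         path.append(channel)
--
--     conversion = sum([x[2] for x in visits])>0
--     if conversion:
--         path.append('conversion')
--     else:
--         path.append('null')
--
--     value = sum([x[4] for x in visits])
--     path.append(str(value))
--
--
--     return path
-- ===== SOURCE B (Python) =====
-- def _insort(ordered, x):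
--     # stable insert: x goes after every already-present visit whose timestamp <= x's
--     i = 0
--     while i < len(ordered) and not (x[3] < ordered[i][3]):
--         i += 1
--     ordered.insert(i, x)
--
-- def create_path_with_value(element):
--     ordered = []
--     conv = 0
--     val = 0
--     for x in element[1]:
--         conv += x[2]
--         val += x[4]
--         _insort(ordered, x)
--     return ['start'] + [x[1] for x in ordered] + \
--            ['conversion' if conv > 0 else 'null', str(val)]
-- ===== Notes on version B (the rewrite author's own statement) =====
-- stated objective: alternative
-- what changed: Replaces the library sort plus three separate post-sort scans with a hand-written stable insertion sort whose single loop also accumulates both sums, assembling the result by list concatenation.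
import Mathlib
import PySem

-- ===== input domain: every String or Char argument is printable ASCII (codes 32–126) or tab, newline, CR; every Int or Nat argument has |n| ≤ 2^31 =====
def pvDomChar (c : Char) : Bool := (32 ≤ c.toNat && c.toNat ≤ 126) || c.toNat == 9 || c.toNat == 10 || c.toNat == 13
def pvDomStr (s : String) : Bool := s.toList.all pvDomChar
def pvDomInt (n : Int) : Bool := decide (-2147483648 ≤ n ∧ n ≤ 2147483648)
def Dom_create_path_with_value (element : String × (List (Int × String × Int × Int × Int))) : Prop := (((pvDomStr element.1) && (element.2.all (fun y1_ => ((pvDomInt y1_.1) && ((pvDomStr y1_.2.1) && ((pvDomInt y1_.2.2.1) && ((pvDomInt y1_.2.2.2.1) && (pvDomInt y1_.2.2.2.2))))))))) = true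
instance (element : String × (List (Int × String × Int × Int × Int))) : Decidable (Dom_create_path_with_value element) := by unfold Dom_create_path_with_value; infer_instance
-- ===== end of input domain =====

-- B replaces the library sort + three post-sort scans by a hand-written stable insertion
-- sort whose single loop also accumulates both sums; objective: alternative.

-- ===== PORT A =====
def create_path_with_value (element : String × (List (Int × String × Int × Int × Int))) : List String :=
  let visits := PySem.List.sorted element.2 (fun x => x.2.2.2.1) false
  let channels := visits.map (fun x => x.2.1)
  let path := channels.foldl (fun p c => p ++ [c]) ["start"]
  let conversion := (visits.map (fun x => x.2.2.1)).sum > 0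
  let path := if conversion then path ++ ["conversion"] else path ++ ["null"]
  path ++ [PySem.Int.toStr ((visits.map (fun x => x.2.2.2.2)).sum)]

-- ===== PORT B =====
-- stable insert: x goes after every already-present visit whose timestamp ≤ x's
def pvInsort (x : Int × String × Int × Int × Int) :
    List (Int × String × Int × Int × Int) → List (Int × String × Int × Int × Int)
  | [] => [x]
  | y :: t => if x.2.2.2.1 < y.2.2.2.1 then x :: y :: t else y :: pvInsort x t

def create_path_with_value_alt (element : String × (List (Int × String × Int × Int × Int))) : List String :=
  let s := element.2.foldl
    (fun (st : List (Int × String × Int × Int × Int) × Int × Int) x =>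
      (pvInsort x st.1, st.2.1 + x.2.2.1, st.2.2 + x.2.2.2.2)) ([], 0, 0)
  ["start"] ++ s.1.map (fun x => x.2.1)
    ++ [if s.2.1 > 0 then "conversion" else "null", PySem.Int.toStr s.2.2]

-- ===== PRECONDITION & SPEC =====
def Spec_create_path_with_value (element : String × (List (Int × String × Int × Int × Int))) (out : List String) : Prop := out = create_path_with_value_alt element
instance (element : String × (List (Int × String × Int × Int × Int))) (out : List String) : Decidable (Spec_create_path_with_value element out) := by unfold Spec_create_path_with_value; infer_instance

-- ===== CLAIM =====
def Claim_equal_create_path_with_value : Prop := ∀ (element : String × (List (Int × String × Int × Int × Int))), Dom_create_path_with_value element → Spec_create_path_with_value element (create_path_with_value element)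

-- ===== LEMMAS AND PROOFS =====
theorem pvInsort_eq_insertBy (x : Int × String × Int × Int × Int)
    (ys : List (Int × String × Int × Int × Int)) :
    pvInsort x ys = PySem.List.insertBy (fun a b => decide (a.2.2.2.1 < b.2.2.2.1)) x ys := by
  induction ys with
  | nil => simp [pvInsort, PySem.List.insertBy]
  | cons y t ih => simp only [pvInsort, PySem.List.insertBy, ih]; split <;> simp_all

theorem pv_fold_triple (vs : List (Int × String × Int × Int × Int))
    (o : List (Int × String × Int × Int × Int)) (c v : Int) :
    vs.foldl (fun (st : List (Int × String × Int × Int × Int) × Int × Int) x =>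
        (pvInsort x st.1, st.2.1 + x.2.2.1, st.2.2 + x.2.2.2.2)) (o, c, v)
      = (vs.foldl (fun acc x => PySem.List.insertBy (fun a b => decide (a.2.2.2.1 < b.2.2.2.1)) x acc) o,
         c + (vs.map (fun x => x.2.2.1)).sum, v + (vs.map (fun x => x.2.2.2.2)).sum) := by
  induction vs generalizing o c v with
  | nil => simp
  | cons h t ih =>
    rw [List.foldl_cons, List.foldl_cons, ih, pvInsort_eq_insertBy]
    simp [add_assoc]

theorem pv_foldl_app (cs : List String) (p : List String) :
    cs.foldl (fun p c => p ++ [c]) p = p ++ cs := by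
  induction cs generalizing p with
  | nil => simp
  | cons h t ih => simp [List.foldl, ih]

-- ===== VERDICT =====
theorem create_path_with_value_spec : Claim_equal_create_path_with_value := by
  intro element _
  show _ = _
  have hperm := (PySem.List.sorted_perm element.2 (fun x : Int × String × Int × Int × Int => x.2.2.2.1) false)
  simp only [create_path_with_value, create_path_with_value_alt, pv_fold_triple, pv_foldl_app,
    ← PySem.List.sorted_eq_foldl_insertBy,
    (hperm.map (fun x : Int × String × Int × Int × Int => x.2.2.1)).sum_eq,
    (hperm.map (fun x : Int × String × Int × Int × Int => x.2.2.2.2)).sum_eq]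
  split <;> simp_all
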